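-- pv_equiv track=rewrite | github.com/dunkdunkdunk/ComProg1 | Final_Review_01.py | get_consensus_generic
-- ===== SOURCE A (Python) =====
-- def get_consensus_generic(ss):
--     ss,sl=[i.upper() for i in ss.split('\n')],max(len(i) for i in ss.split('\n'))
--     for i in range(len(ss)):
--         if len(ss[i])<sl:
--             ss[i]=ss[i]+'0'*(sl-len(ss[i]))
--     consensus=[]
--     for i in range(len(ss[0])):
--         num=[]
--         for j in ss:
--             num.append(j[i])
--         count=dict()
--         for k in num:
--             if k in count.keys():
--                 count[k]+=1
--             else: count[k]=1
--         m=max(count.values())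
--         ans=[]
--         for n in count:
--             if count[n]==m:ans.append(n)
--         ans.sort()
--         consensus.append('/'.join(ans))
--     consensus=' '.join(consensus)
--     return consensus # DO NOT MODIFY THIS LINE
-- ===== SOURCE B (Python) =====
-- def get_consensus_generic(ss):
--     rows = [r.upper() for r in ss.split('\n')]
--     width = max(len(r) for r in rows)
--     cols = [dict() for _ in range(width)]
--     for r in rows:
--         padded = r + '0' * (width - len(r))
--         for c, ch in enumerate(padded):
--             cols[c][ch] = cols[c].get(ch, 0) + 1
--     out = []
--     for d in cols:
--         m = max(d.values())
--         out.append('/'.join(sorted(ch for ch, v in d.items() if v == m)))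
--     return ' '.join(out)
-- ===== Notes on version B (the rewrite author's own statement) =====
-- stated objective: alternative
-- what changed: A re-gathers each column (inner scan per column index) and counts it with a fresh dict; B makes one row-major pass maintaining a table of per-column counting dicts, then a separate consensus pass over that table.
import Mathlib
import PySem

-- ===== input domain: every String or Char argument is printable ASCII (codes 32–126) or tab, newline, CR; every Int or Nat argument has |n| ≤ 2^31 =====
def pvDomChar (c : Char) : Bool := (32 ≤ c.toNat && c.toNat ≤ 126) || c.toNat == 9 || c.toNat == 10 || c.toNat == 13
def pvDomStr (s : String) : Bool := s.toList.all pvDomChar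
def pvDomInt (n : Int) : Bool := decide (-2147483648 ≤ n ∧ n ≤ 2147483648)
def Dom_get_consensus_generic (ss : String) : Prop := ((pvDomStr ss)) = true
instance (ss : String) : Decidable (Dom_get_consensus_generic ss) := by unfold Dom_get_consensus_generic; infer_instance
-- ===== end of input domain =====

-- B replaces A's column-by-column re-gathering with one row-major pass maintaining a table of
-- per-column counting dicts, then a separate consensus pass over that table (objective: alternative).

-- ===== PORT A =====
-- Body of A's outer `for i in range(len(ss[0]))` loop. The defaults fed to `.getD` are never
-- consulted: every row has been padded to length sl, so j[i] is in range, and `max()` / `ss[0]`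
-- act on nonempty lists (str.split always returns at least one piece).
def pvBodyA (rows : List (List Char)) (consensus : List (List Char)) (i : Nat) : List (List Char) :=
  let num := rows.foldl (fun num j => num ++ [(PySem.List.pyGet? j (i : Int)).getD '0']) []
  let count := num.foldl (fun d k =>
      if d.contains k then d.insert k (d.getD k 0 + 1) else d.insert k (1 : Int))
    PySem.Dict.empty
  let m := (PySem.List.max? count.values (fun v => v)).getD 0
  let ans := count.keys.foldl (fun ans n => if count.getD n 0 = m then ans ++ [n] else ans) []
  let ans := PySem.List.sorted ans (fun c => c) false
  consensus ++ [PySem.Chars.join ['/'] (ans.map (fun c => [c]))]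

def get_consensus_generic (ss : String) : String :=
  let rows0 := PySem.Chars.splitOn ss.toList ['\n']
  let upped := rows0.map PySem.Chars.upper
  let sl := (PySem.List.max? (rows0.map (fun i => i.length)) (fun v => v)).getD 0
  let rows := upped.map (fun r => if r.length < sl then r ++ List.replicate (sl - r.length) '0' else r)
  let consensus := (List.range (rows.headD []).length).foldl (pvBodyA rows) []
  String.ofList (PySem.Chars.join [' '] consensus)

-- ===== PORT B =====
def pvPieceB (d : PySem.Dict Char Int) : List Char :=
  let m := (PySem.List.max? d.values (fun v => v)).getD 0
  PySem.Chars.join ['/']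
    ((PySem.List.sorted ((d.items.filter (fun p => p.2 == m)).map (·.1)) (fun c => c) false).map
      (fun c => [c]))

def get_consensus_generic_alt (ss : String) : String :=
  let rows := (PySem.Chars.splitOn ss.toList ['\n']).map PySem.Chars.upper
  let width := (PySem.List.max? (rows.map (fun r => r.length)) (fun v => v)).getD 0
  let init := (List.range width).map (fun _ => (PySem.Dict.empty : PySem.Dict Char Int))
  let cols := rows.foldl (fun cols r =>
      let padded := r ++ List.replicate (width - r.length) '0'
      List.zipWith (fun d ch => d.insert ch (d.getD ch 0 + 1)) cols padded) init
  let out := cols.map pvPieceB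
  String.ofList (PySem.Chars.join [' '] out)

-- ===== PRECONDITION & SPEC =====
def Spec_get_consensus_generic (ss : String) (out : String) : Prop := out = get_consensus_generic_alt ss
instance (ss : String) (out : String) : Decidable (Spec_get_consensus_generic ss out) := by unfold Spec_get_consensus_generic; infer_instance

-- ===== CLAIM (what is proved, stated in full; the proofs are below) =====
def Claim_equal_get_consensus_generic : Prop := ∀ (ss : String), Dom_get_consensus_generic ss → Spec_get_consensus_generic ss (get_consensus_generic ss)

-- ===== LEMMAS AND PROOFS =====

-- str.split(sep) always returns at least one piece
theorem pv_go_ne_nil (sep : List Char) : ∀ (fuel : Nat) (l cur : List Char) (acc : List (List Char)),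
    PySem.Chars.splitOn.go sep fuel l cur acc ≠ [] := by
  intro fuel
  induction fuel with
  | zero => intro l cur acc; simp [PySem.Chars.splitOn.go]
  | succ n ih =>
    intro l cur acc
    cases l with
    | nil => simp [PySem.Chars.splitOn.go]
    | cons c rest =>
      rw [PySem.Chars.splitOn.go]
      split
      · exact ih _ _ _
      · exact ih _ _ _

theorem pv_splitOn_ne_nil (s sep : List Char) : PySem.Chars.splitOn s sep ≠ [] :=
  pv_go_ne_nil sep _ s [] []

-- a fold of zipWith steps over equal-length rows is the per-column fold
theorem pv_foldB {α β : Type} (f : β → α → β) (dA : α) (dB : β) :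
    ∀ (prows : List (List α)) (cs : List β),
    (∀ r ∈ prows, r.length = cs.length) →
    prows.foldl (fun cols r => List.zipWith f cols r) cs
      = (List.range cs.length).map (fun i => (prows.map (fun r => r.getD i dA)).foldl f (cs.getD i dB)) := by
  intro prows
  induction prows with
  | nil =>
    intro cs _
    simp only [List.foldl_nil, List.map_nil]
    apply List.ext_getElem (by simp)
    intro i h1 h2
    simp [List.getD_eq_getElem?_getD, h1]
  | cons r prows ih =>
    intro cs hlen
    have hr : r.length = cs.length := hlen r (by simp)
    have hzl : (List.zipWith f cs r).length = cs.length := by simp [hr]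
    rw [List.foldl_cons, ih _ (by intro r' hr'; rw [hzl]; exact hlen r' (by simp [hr']))]
    rw [hzl]
    apply List.map_congr_left
    intro i hi
    simp only [List.mem_range] at hi
    have hir : i < r.length := by omega
    have key : (List.zipWith f cs r)[i]?.getD dB = f (cs[i]?.getD dB) (r[i]?.getD dA) := by
      simp [hi, hir, List.getElem_zipWith]
    simp only [List.getD_eq_getElem?_getD, List.map_cons, List.foldl_cons]
    rw [key]

-- A's counting loop builds Counter(num)
theorem pv_countA_eq (num : List Char) :
    num.foldl (fun d k => if d.contains k then d.insert k (d.getD k 0 + 1) else d.insert k (1 : Int))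
        PySem.Dict.empty = PySem.Dict.counter num := by
  rw [← PySem.Dict.foldl_insert_getD_add_one_eq_counter]
  apply PySem.List.foldl_congr_mem
  intro d k _
  by_cases h : d.contains k
  · simp [h]
  · rw [if_neg h, PySem.Dict.getD_of_not_contains d 0 (by simpa using h)]; norm_num

-- A's keys-filter loop equals B's items-filter over the same counter
theorem pv_ans_eq (num : List Char) (m : Int) :
    (PySem.Dict.counter num).keys.foldl
        (fun ans n => if (PySem.Dict.counter num).getD n 0 = m then ans ++ [n] else ans) []
    = ((PySem.Dict.counter num).items.filter (fun p => p.2 == m)).map (·.1) := by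
  have hnd := PySem.Dict.nodup_keys_counter (xs := num)
  rw [PySem.List.foldl_append_ite_eq_filter]
  rw [PySem.Dict.items_eq_map_keys _ hnd 0, List.filter_map, List.map_map]
  simp only [List.nil_append, Function.comp_def]
  rw [List.map_id']
  apply List.filter_congr
  intro k _
  exact (Bool.beq_eq_decide_eq _ _).symm


def pvColumn (prows : List (List Char)) (i : Nat) : List Char := prows.map (fun r => r.getD i '0')

def pvPad (sl : Nat) (r : List Char) : List Char := r ++ List.replicate (sl - r.length) '0'

-- A's loop body appends the consensus piece of column i
theorem pv_bodyA_eq (prows : List (List Char)) (i : Nat) (c : List (List Char)) :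
    pvBodyA prows c i = c ++ [pvPieceB (PySem.Dict.counter (pvColumn prows i))] := by
  unfold pvBodyA pvPieceB pvColumn
  simp only []
  rw [PySem.List.foldl_append_singleton_eq_map, List.nil_append]
  have hnum : prows.map (fun j => (PySem.List.pyGet? j (i : Int)).getD '0')
      = prows.map (fun r => r.getD i '0') := by
    apply List.map_congr_left
    intro j hj
    rw [PySem.List.pyGet?_natCast, List.getD_eq_getElem?_getD]
  rw [hnum, pv_countA_eq, pv_ans_eq]

theorem pv_A_loop (prows : List (List Char)) (sl : Nat) :
    (List.range sl).foldl (pvBodyA prows) []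
      = (List.range sl).map (fun i => pvPieceB (PySem.Dict.counter (pvColumn prows i))) := by
  rw [PySem.List.foldl_congr_mem _ _
    (fun c i => c ++ [pvPieceB (PySem.Dict.counter (pvColumn prows i))]) _
    (by intro c i _; exact pv_bodyA_eq prows i c)]
  rw [PySem.List.foldl_append_singleton_eq_map, List.nil_append]

theorem pv_B_cols (upped : List (List Char)) (sl : Nat) (hle : ∀ r ∈ upped, r.length ≤ sl) :
    upped.foldl (fun cols r =>
        List.zipWith (fun d ch => d.insert ch (d.getD ch 0 + 1)) cols (r ++ List.replicate (sl - r.length) '0'))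
      ((List.range sl).map (fun _ => (PySem.Dict.empty : PySem.Dict Char Int)))
    = (List.range sl).map (fun i => PySem.Dict.counter (pvColumn (upped.map (pvPad sl)) i)) := by
  have h1 : upped.foldl (fun cols r =>
        List.zipWith (fun d ch => d.insert ch (d.getD ch 0 + 1)) cols (r ++ List.replicate (sl - r.length) '0'))
      ((List.range sl).map (fun _ => (PySem.Dict.empty : PySem.Dict Char Int)))
      = (upped.map (pvPad sl)).foldl (fun cols r => List.zipWith (fun d ch => d.insert ch (d.getD ch 0 + 1)) cols r)
        ((List.range sl).map (fun _ => (PySem.Dict.empty : PySem.Dict Char Int))) := by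
    rw [List.foldl_map]
    rfl
  rw [h1]
  have hcslen : ((List.range sl).map (fun _ => (PySem.Dict.empty : PySem.Dict Char Int))).length = sl := by simp
  have hplen : ∀ p ∈ upped.map (pvPad sl), p.length = ((List.range sl).map (fun _ => (PySem.Dict.empty : PySem.Dict Char Int))).length := by
    rw [hcslen]
    intro p hp
    obtain ⟨r, hr, rfl⟩ := List.mem_map.mp hp
    have := hle r hr
    simp [pvPad]
    omega
  rw [pv_foldB _ '0' PySem.Dict.empty _ _ hplen, hcslen]
  apply List.map_congr_left
  intro i hi
  have hget : ((List.range sl).map (fun _ => (PySem.Dict.empty : PySem.Dict Char Int))).getD i PySem.Dict.empty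
      = PySem.Dict.empty := by
    simp only [List.getD_eq_getElem?_getD, List.getElem?_map]
    cases (List.range sl)[i]? <;> simp
  rw [hget, PySem.Dict.foldl_insert_getD_add_one_eq_counter]
  rfl

theorem pv_main (ss : String) : get_consensus_generic ss = get_consensus_generic_alt ss := by
  unfold get_consensus_generic get_consensus_generic_alt
  simp only []
  set rows0 := PySem.Chars.splitOn ss.toList ['\n'] with hrows0
  set sl := (PySem.List.max? (rows0.map (fun i => i.length)) (fun v => v)).getD 0 with hsl
  have hupplen : ∀ r : List Char, (PySem.Chars.upper r).length = r.length := by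
    intro r; simp [PySem.Chars.upper]
  have hwidth : (PySem.List.max? ((rows0.map PySem.Chars.upper).map (fun r => r.length)) (fun v => v)).getD 0 = sl := by
    rw [List.map_map]
    have : (fun r => List.length r) ∘ PySem.Chars.upper = fun i : List Char => i.length := by
      funext r; exact hupplen r
    rw [this]
  have hle : ∀ r ∈ rows0, r.length ≤ sl := by
    intro r hr
    obtain ⟨M, hM⟩ : ∃ M, PySem.List.max? (rows0.map (fun i : List Char => i.length)) (fun v => v) = some M := by
      cases h : PySem.List.max? (rows0.map (fun i : List Char => i.length)) (fun v => v) with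
      | none =>
        exact absurd (List.map_eq_nil_iff.mp ((PySem.List.max?_eq_none_iff _ _).mp h))
          (pv_splitOn_ne_nil _ _)
      | some M => exact ⟨M, rfl⟩
    have := PySem.List.max?_isMax hM r.length (List.mem_map_of_mem hr)
    rw [hsl, hM]
    exact this
  have hpadeq : ((rows0.map PySem.Chars.upper).map (fun r => if r.length < sl then r ++ List.replicate (sl - r.length) '0' else r))
      = (rows0.map PySem.Chars.upper).map (pvPad sl) := by
    apply List.map_congr_left
    intro r _
    by_cases h : r.length < sl
    · rw [if_pos h]; rfl
    · rw [if_neg h]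
      have h0 : sl - r.length = 0 := by omega
      simp [pvPad, h0]
  have hplen : ∀ p ∈ (rows0.map PySem.Chars.upper).map (pvPad sl), p.length = sl := by
    intro p hp
    obtain ⟨r, hr, rfl⟩ := List.mem_map.mp hp
    obtain ⟨r0, hr0, rfl⟩ := List.mem_map.mp hr
    have := hle r0 hr0
    have := hupplen r0
    simp [pvPad]
    omega
  have hhead : (((rows0.map PySem.Chars.upper).map (pvPad sl)).headD []).length = sl := by
    obtain ⟨h, t, hht⟩ : ∃ h t, rows0 = h :: t := by
      cases hr : rows0 with
      | nil => exact absurd hr (pv_splitOn_ne_nil _ _)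
      | cons h t => exact ⟨h, t, rfl⟩
    rw [hht]
    exact hplen _ (by rw [hht]; simp)
  rw [hpadeq, hwidth, hhead, pv_A_loop _ sl, pv_B_cols _ sl
    (by intro r hr; obtain ⟨r0, hr0, rfl⟩ := List.mem_map.mp hr; rw [hupplen]; exact hle r0 hr0)]
  simp only [List.map_map, Function.comp_def]

-- ===== VERDICT (by name: the statement is the Claim_ definition above) =====
theorem get_consensus_generic_spec : Claim_equal_get_consensus_generic := by
  intro ss _
  show _ = _
  exact pv_main ss
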